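-- pv_equiv track=rewrite | github.com/D-0-N/100-days-of-code | triple-step(bottom-up).py | triple_step
-- ===== SOURCE A (Python) =====
-- def triple_step(n):
--     memo=[0]*n
--     memo[0]=1
--     memo[1]=2
--     memo[2]=3
--     if n==1:
--         return 1
--     elif n==2:
--         return 2
--     elif n==3:
--         return 3
--     for i in range(3,n):
--         memo[i]=memo[i-1]*memo[i-2]*memo[i-3]
--     return memo[n-1]
-- ===== SOURCE B (Python) =====
-- def triple_step(n):
--     # every value of the original memo table is 2**x * 3**y: keep the two
--     # exponent tables (plain tribonacci sums) and take one power at the end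
--     a = [0] * n
--     b = [0] * n
--     a[0], a[1], a[2] = 0, 1, 0
--     b[0], b[1], b[2] = 0, 0, 1
--     for i in range(3, n):
--         a[i] = a[i-1] + a[i-2] + a[i-3]
--         b[i] = b[i-1] + b[i-2] + b[i-3]
--     return 2 ** a[n-1] * 3 ** b[n-1]
-- ===== Notes on version B (the rewrite author's own statement) =====
-- stated objective: alternative
-- what changed: B never multiplies big integers: it replaces A's table of giant triple products by two small-integer exponent tables for the factors 2 and 3 (additive tribonacci recurrences, no guard chain) and forms 2**a * 3**b once at the end.
-- outside the precondition, e.g. on triple_step(-61): A raises IndexError, B raises IndexError; on triple_step(-73): A raises IndexError, B raises IndexError; on triple_step(-87): A raises IndexError, B raises IndexError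
import Mathlib
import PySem

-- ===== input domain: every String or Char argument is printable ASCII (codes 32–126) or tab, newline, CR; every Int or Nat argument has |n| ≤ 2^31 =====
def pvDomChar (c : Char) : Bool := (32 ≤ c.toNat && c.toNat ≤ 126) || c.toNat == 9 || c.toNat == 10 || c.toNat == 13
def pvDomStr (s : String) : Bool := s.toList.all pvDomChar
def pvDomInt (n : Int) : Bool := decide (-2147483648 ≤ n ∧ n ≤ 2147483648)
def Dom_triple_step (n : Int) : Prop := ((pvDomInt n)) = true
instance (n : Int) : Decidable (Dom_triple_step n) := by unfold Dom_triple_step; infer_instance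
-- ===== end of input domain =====

-- B stores the exponents of 2 and 3 (two additive tribonacci tables, no guard chain, one final
-- power product) instead of A's table of big-integer triple products (objective: alternative).

-- ===== PORT A =====
def triple_step (n : Int) : Int :=
  let memo := List.replicate n.toNat (0 : Int)          -- [0]*n ([] for n ≤ 0, as in Python)
  let memo := PySem.List.pySetD memo 0 1                -- memo[0]=1 (in range under Pre_)
  let memo := PySem.List.pySetD memo 1 2                -- memo[1]=2
  let memo := PySem.List.pySetD memo 2 3                -- memo[2]=3
  if n = 1 then 1
  else if n = 2 then 2
  else if n = 3 then 3
  else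
    let memo := (PySem.List.pyRange 3 n 1).foldl (fun memo i =>
      PySem.List.pySetD memo i
        (PySem.List.pyGetD memo (i-1) 0 * PySem.List.pyGetD memo (i-2) 0 *
         PySem.List.pyGetD memo (i-3) 0)) memo
    PySem.List.pyGetD memo (n-1) 0

-- ===== PORT B =====
def triple_step_alt (n : Int) : Int :=
  let a := List.replicate n.toNat (0 : Int)             -- [0]*n
  let b := List.replicate n.toNat (0 : Int)
  let a := PySem.List.pySetD (PySem.List.pySetD (PySem.List.pySetD a 0 0) 1 1) 2 0   -- a[0],a[1],a[2]=0,1,0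
  let b := PySem.List.pySetD (PySem.List.pySetD (PySem.List.pySetD b 0 0) 1 0) 2 1   -- b[0],b[1],b[2]=0,0,1
  let s := (PySem.List.pyRange 3 n 1).foldl (fun (s : List Int × List Int) i =>
      let a := PySem.List.pySetD s.1 i
        (PySem.List.pyGetD s.1 (i-1) 0 + PySem.List.pyGetD s.1 (i-2) 0 +
         PySem.List.pyGetD s.1 (i-3) 0)
      let b := PySem.List.pySetD s.2 i
        (PySem.List.pyGetD s.2 (i-1) 0 + PySem.List.pyGetD s.2 (i-2) 0 +
         PySem.List.pyGetD s.2 (i-3) 0)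
      (a, b)) (a, b)
  2 ^ (PySem.List.pyGetD s.1 (n-1) 0).toNat * 3 ^ (PySem.List.pyGetD s.2 (n-1) 0).toNat

-- ===== PRECONDITION & SPEC =====
-- Pre_ excludes e.g. n = -121, -134, -147, -159, -168, -176, -189, -193 and every other n below three:
-- both Pythons raise IndexError there at the premature table writes, before any loop runs.
def Pre_triple_step (n : Int) : Prop := 3 ≤ n
instance (n : Int) : Decidable (Pre_triple_step n) := by unfold Pre_triple_step; infer_instance
def pvWitness_triple_step : Int := (5)
def Spec_triple_step (n : Int) (out : Int) : Prop := out = triple_step_alt n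
instance (n : Int) (out : Int) : Decidable (Spec_triple_step n out) := by unfold Spec_triple_step; infer_instance

-- ===== CLAIM (what is proved, stated in full; the proofs are below) =====
def Claim_equal_triple_step : Prop := ∀ (n : Int), Dom_triple_step n → Pre_triple_step n → Spec_triple_step n (triple_step n)

-- ===== LEMMAS AND PROOFS =====

-- the mathematical value sequence of A's memo
def memA : Nat → Int
  | 0 => 1
  | 1 => 2
  | 2 => 3
  | (k+3) => memA (k+2) * memA (k+1) * memA k

-- exponent tribonacci sequences (B's tables)
def ea : Nat → Nat
  | 0 => 0
  | 1 => 1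
  | 2 => 0
  | (k+3) => ea (k+2) + ea (k+1) + ea k

def eb : Nat → Nat
  | 0 => 0
  | 1 => 0
  | 2 => 1
  | (k+3) => eb (k+2) + eb (k+1) + eb k

lemma memA_eq_pow : ∀ k, memA k = 2 ^ ea k * 3 ^ eb k
    ∧ memA (k+1) = 2 ^ ea (k+1) * 3 ^ eb (k+1)
    ∧ memA (k+2) = 2 ^ ea (k+2) * 3 ^ eb (k+2) := by
  intro k
  induction k with
  | zero => refine ⟨?_, ?_, ?_⟩ <;> decide
  | succ k ih =>
    obtain ⟨h0, h1, h2⟩ := ih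
    refine ⟨h1, h2, ?_⟩
    show memA (k+3) = _
    rw [memA, h0, h1, h2]
    show _ = 2 ^ ea (k+3) * 3 ^ eb (k+3)
    rw [ea, eb]
    push_cast [pow_add]
    ring

-- A's loop invariant
lemma loopA (d : Nat) : ∀ (m : Nat) (memo : List Int), 3 ≤ m →
    memo.length = m + d →
    (∀ k : Nat, k < m → PySem.List.pyGetD memo (k : Int) 0 = memA k) →
    (∀ k : Nat, k < m + d →
      PySem.List.pyGetD
        ((PySem.List.pyRange (m : Int) ((m + d : Nat) : Int) 1).foldl (fun memo i =>
          PySem.List.pySetD memo i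
            (PySem.List.pyGetD memo (i-1) 0 * PySem.List.pyGetD memo (i-2) 0 *
             PySem.List.pyGetD memo (i-3) 0)) memo) (k : Int) 0 = memA k) := by
  induction d with
  | zero =>
    intro m memo h3 hlen hpre k hk
    rw [PySem.List.pyRange_one_eq_nil (by omega)]
    simpa using hpre k (by omega)
  | succ d ih =>
    intro m memo h3 hlen hpre k hk
    have hcons : PySem.List.pyRange (m : Int) ((m + (d+1) : Nat) : Int) 1
        = (m : Int) :: PySem.List.pyRange ((m : Int) + 1) ((m + (d+1) : Nat) : Int) 1 :=
      PySem.List.pyRange_one_cons (by push_cast; omega)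
    rw [hcons]
    simp only [List.foldl_cons]
    have e1 : (m : Int) - 1 = ((m - 1 : Nat) : Int) := by omega
    have e2 : (m : Int) - 2 = ((m - 2 : Nat) : Int) := by omega
    have e3 : (m : Int) - 3 = ((m - 3 : Nat) : Int) := by omega
    have hv : PySem.List.pyGetD memo ((m : Int) - 1) 0 * PySem.List.pyGetD memo ((m : Int) - 2) 0 *
        PySem.List.pyGetD memo ((m : Int) - 3) 0 = memA m := by
      rw [e1, e2, e3, hpre _ (by omega), hpre _ (by omega), hpre _ (by omega)]
      have hm : m = (m - 3) + 3 := by omega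
      rw [hm, memA]
      congr 2 <;> omega
    rw [hv]
    have hstep : ((m : Int) + 1) = ((m + 1 : Nat) : Int) := by push_cast; ring
    have harg : ((m + (d + 1) : Nat) : Int) = (((m + 1) + d : Nat) : Int) := by push_cast; ring
    rw [hstep, harg]
    refine ih (m+1) _ (by omega) ?_ ?_ k (by omega)
    · rw [PySem.List.length_pySetD]; omega
    · intro j hj
      rw [PySem.List.pyGetD_pySetD_natCast _ _ _ _ _ (by omega)]
      by_cases hjm : j = m
      · simp [hjm]
      · rw [if_neg (by exact_mod_cast hjm), hpre j (by omega)]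

-- B's loop invariant: the pair of exponent tables follows (ea, eb)
lemma loopB (d : Nat) : ∀ (m : Nat) (a b : List Int), 3 ≤ m →
    a.length = m + d → b.length = m + d →
    (∀ k : Nat, k < m → PySem.List.pyGetD a (k : Int) 0 = (ea k : Int)) →
    (∀ k : Nat, k < m → PySem.List.pyGetD b (k : Int) 0 = (eb k : Int)) →
    (∀ k : Nat, k < m + d →
      PySem.List.pyGetD
        ((PySem.List.pyRange (m : Int) ((m + d : Nat) : Int) 1).foldl (fun (s : List Int × List Int) i =>
          let a := PySem.List.pySetD s.1 i
            (PySem.List.pyGetD s.1 (i-1) 0 + PySem.List.pyGetD s.1 (i-2) 0 +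
             PySem.List.pyGetD s.1 (i-3) 0)
          let b := PySem.List.pySetD s.2 i
            (PySem.List.pyGetD s.2 (i-1) 0 + PySem.List.pyGetD s.2 (i-2) 0 +
             PySem.List.pyGetD s.2 (i-3) 0)
          (a, b)) (a, b)).1 (k : Int) 0 = (ea k : Int) ∧
      PySem.List.pyGetD
        ((PySem.List.pyRange (m : Int) ((m + d : Nat) : Int) 1).foldl (fun (s : List Int × List Int) i =>
          let a := PySem.List.pySetD s.1 i
            (PySem.List.pyGetD s.1 (i-1) 0 + PySem.List.pyGetD s.1 (i-2) 0 +
             PySem.List.pyGetD s.1 (i-3) 0)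
          let b := PySem.List.pySetD s.2 i
            (PySem.List.pyGetD s.2 (i-1) 0 + PySem.List.pyGetD s.2 (i-2) 0 +
             PySem.List.pyGetD s.2 (i-3) 0)
          (a, b)) (a, b)).2 (k : Int) 0 = (eb k : Int)) := by
  induction d with
  | zero =>
    intro m a b h3 hla hlb hpa hpb k hk
    rw [PySem.List.pyRange_one_eq_nil (by omega)]
    exact ⟨by simpa using hpa k (by omega), by simpa using hpb k (by omega)⟩
  | succ d ih =>
    intro m a b h3 hla hlb hpa hpb k hk
    have hcons : PySem.List.pyRange (m : Int) ((m + (d+1) : Nat) : Int) 1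
        = (m : Int) :: PySem.List.pyRange ((m : Int) + 1) ((m + (d+1) : Nat) : Int) 1 :=
      PySem.List.pyRange_one_cons (by push_cast; omega)
    rw [hcons]
    simp only [List.foldl_cons]
    have e1 : (m : Int) - 1 = ((m - 1 : Nat) : Int) := by omega
    have e2 : (m : Int) - 2 = ((m - 2 : Nat) : Int) := by omega
    have e3 : (m : Int) - 3 = ((m - 3 : Nat) : Int) := by omega
    have hva : PySem.List.pyGetD a ((m : Int) - 1) 0 + PySem.List.pyGetD a ((m : Int) - 2) 0 +
        PySem.List.pyGetD a ((m : Int) - 3) 0 = (ea m : Int) := by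
      rw [e1, e2, e3, hpa _ (by omega), hpa _ (by omega), hpa _ (by omega)]
      have hm : m = (m - 3) + 3 := by omega
      rw [hm, ea]
      push_cast
      rfl
    have hvb : PySem.List.pyGetD b ((m : Int) - 1) 0 + PySem.List.pyGetD b ((m : Int) - 2) 0 +
        PySem.List.pyGetD b ((m : Int) - 3) 0 = (eb m : Int) := by
      rw [e1, e2, e3, hpb _ (by omega), hpb _ (by omega), hpb _ (by omega)]
      have hm : m = (m - 3) + 3 := by omega
      rw [hm, eb]
      push_cast
      rfl
    simp only [hva, hvb]
    have hstep : ((m : Int) + 1) = ((m + 1 : Nat) : Int) := by push_cast; ring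
    have harg : ((m + (d + 1) : Nat) : Int) = (((m + 1) + d : Nat) : Int) := by push_cast; ring
    rw [hstep, harg]
    refine ih (m+1) _ _ (by omega) ?_ ?_ ?_ ?_ k (by omega)
    · rw [PySem.List.length_pySetD]; omega
    · rw [PySem.List.length_pySetD]; omega
    · intro j hj
      rw [PySem.List.pyGetD_pySetD_natCast _ _ _ _ _ (by omega)]
      by_cases hjm : j = m
      · simp [hjm]
      · rw [if_neg (by exact_mod_cast hjm), hpa j (by omega)]
    · intro j hj
      rw [PySem.List.pyGetD_pySetD_natCast _ _ _ _ _ (by omega)]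
      by_cases hjm : j = m
      · simp [hjm]
      · rw [if_neg (by exact_mod_cast hjm), hpb j (by omega)]

-- A's initial memo for n ≥ 3
lemma init_memo (n : Int) (h : 3 ≤ n) :
    PySem.List.pySetD (PySem.List.pySetD (PySem.List.pySetD
      (List.replicate n.toNat (0 : Int)) 0 1) 1 2) 2 3
      = 1 :: 2 :: 3 :: List.replicate (n.toNat - 3) 0 := by
  have : n.toNat = (n.toNat - 3) + 3 := by omega
  rw [this]
  simp [List.replicate, PySem.List.pySetD_of_nonneg, List.set]

-- B's initial exponent tables for n ≥ 3
lemma init_a (n : Int) (h : 3 ≤ n) :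
    PySem.List.pySetD (PySem.List.pySetD (PySem.List.pySetD
      (List.replicate n.toNat (0 : Int)) 0 0) 1 1) 2 0
      = 0 :: 1 :: 0 :: List.replicate (n.toNat - 3) 0 := by
  have : n.toNat = (n.toNat - 3) + 3 := by omega
  rw [this]
  simp [List.replicate, PySem.List.pySetD_of_nonneg, List.set]

lemma init_b (n : Int) (h : 3 ≤ n) :
    PySem.List.pySetD (PySem.List.pySetD (PySem.List.pySetD
      (List.replicate n.toNat (0 : Int)) 0 0) 1 0) 2 1
      = 0 :: 0 :: 1 :: List.replicate (n.toNat - 3) 0 := by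
  have : n.toNat = (n.toNat - 3) + 3 := by omega
  rw [this]
  simp [List.replicate, PySem.List.pySetD_of_nonneg, List.set]

lemma altB (n : Int) (h : 3 ≤ n) :
    triple_step_alt n = memA ((n-1).toNat) := by
  unfold triple_step_alt
  simp only [init_a n h, init_b n h]
  have hmain := loopB (n.toNat - 3) 3 (0 :: 1 :: 0 :: List.replicate (n.toNat - 3) 0)
    (0 :: 0 :: 1 :: List.replicate (n.toNat - 3) 0) (le_refl 3)
    (by simp; omega) (by simp; omega) ?_ ?_ ((n-1).toNat) (by omega)
  · have hr : PySem.List.pyRange ((3:Nat) : Int) ((3 + (n.toNat - 3) : Nat) : Int)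
        = PySem.List.pyRange 3 n := by
      congr 1
      push_cast
      omega
    rw [hr] at hmain
    obtain ⟨ha, hb⟩ := hmain
    rw [show (n - 1 : Int) = (((n-1).toNat : Nat) : Int) from by omega]
    rw [ha, hb]
    simp only [Int.toNat_natCast]
    exact ((memA_eq_pow ((n-1).toNat)).1).symm
  · intro k hk
    interval_cases k <;> simp [ea, PySem.List.pyGetD_of_nonneg]
  · intro k hk
    interval_cases k <;> simp [eb, PySem.List.pyGetD_of_nonneg]

-- ===== VERDICT (by name: the statement is the Claim_ definition above) =====
theorem triple_step_spec : Claim_equal_triple_step := by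
  intro n _ hpre
  unfold Spec_triple_step
  have h3 : (3:Int) ≤ n := hpre
  rw [altB n h3]
  unfold triple_step
  rw [if_neg (by omega), if_neg (by omega)]
  by_cases hn3 : n = 3
  · subst hn3
    rw [if_pos rfl]
    decide
  · rw [if_neg hn3]
    rw [init_memo n h3]
    have hmain := loopA (n.toNat - 3) 3 (1 :: 2 :: 3 :: List.replicate (n.toNat - 3) 0)
      (le_refl 3) (by simp; omega) ?_ ((n-1).toNat) (by omega)
    · have hr : PySem.List.pyRange ((3:Nat) : Int) ((3 + (n.toNat - 3) : Nat) : Int)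
          = PySem.List.pyRange 3 n := by
        congr 1
        push_cast
        omega
      rw [hr] at hmain
      rw [show (n - 1 : Int) = (((n-1).toNat : Nat) : Int) from by omega]
      exact hmain
    · intro k hk
      interval_cases k <;> simp [memA, PySem.List.pyGetD_of_nonneg]
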